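-- pv_equiv track=rewrite | github.com/DiamondLightSource/Opt-ID | IDSort/src/id_setup.py | create_flip_matrix_list_apple_symmetric
-- ===== SOURCE A (Python) =====
-- def create_flip_matrix_list_apple_symmetric(nperiods):
--     flip = []
--     for i in range(0, (4 * nperiods - 1) - 3, 4):
--         flip.append(((-1,0,0),(0,-1,0),(0,0,1)))
--         flip.append(((1,0,0),(0,1,0),(0,0,1)))
--         flip.append(((-1,0,0),(0,-1,0),(0,0,1)))
--         flip.append(((1,0,0),(0,1,0),(0,0,1)))
--
--     # Append last elements
--
--     flip.append(((-1,0,0),(0,-1,0),(0,0,1)))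
--     flip.append(((1,0,0),(0,1,0),(0,0,1)))
--     flip.append(((-1,0,0),(0,-1,0),(0,0,1)))
--     return flip
-- ===== SOURCE B (Python) =====
-- M1 = ((-1, 0, 0), (0, -1, 0), (0, 0, 1))
-- M2 = ((1, 0, 0), (0, 1, 0), (0, 0, 1))
--
-- def create_flip_matrix_list_apple_symmetric(nperiods):
--     # Strict M1/M2 alternation starting and ending with M1: 2*max(2*nperiods-1,1)+1 entries.
--     return [M1, M2] * max(2 * nperiods - 1, 1) + [M1]
-- ===== Notes on version B (the rewrite author's own statement) =====
-- stated objective: simpler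
-- what changed: Replaces the block-of-four append loop plus fixed three-element tail with a closed-form length and direct list replication ([M1,M2]*max(2n-1,1)+[M1]).
import Mathlib
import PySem

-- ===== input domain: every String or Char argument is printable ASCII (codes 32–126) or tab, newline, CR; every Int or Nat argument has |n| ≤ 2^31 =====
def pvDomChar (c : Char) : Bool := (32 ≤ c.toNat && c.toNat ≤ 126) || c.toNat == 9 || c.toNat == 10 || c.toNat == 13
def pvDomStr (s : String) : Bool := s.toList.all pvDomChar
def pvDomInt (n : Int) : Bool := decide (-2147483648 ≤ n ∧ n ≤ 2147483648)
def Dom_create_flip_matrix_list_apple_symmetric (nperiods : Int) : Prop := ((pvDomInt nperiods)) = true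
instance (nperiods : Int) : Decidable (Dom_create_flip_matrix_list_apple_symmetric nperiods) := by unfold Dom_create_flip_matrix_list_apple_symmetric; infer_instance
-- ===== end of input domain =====

-- B builds the strict M1/M2 alternation directly by list replication with a closed-form
-- length, replacing A's block-of-four append loop plus fixed tail (objective: simpler).


-- the two tuple literals appearing in both Pythons
def pvM1 : (Int × Int × Int) × (Int × Int × Int) × (Int × Int × Int) := ((-1,0,0),(0,-1,0),(0,0,1))
def pvM2 : (Int × Int × Int) × (Int × Int × Int) × (Int × Int × Int) := ((1,0,0),(0,1,0),(0,0,1))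

-- ===== PORT A =====
def create_flip_matrix_list_apple_symmetric (nperiods : Int) : List ((Int × Int × Int) × (Int × Int × Int) × (Int × Int × Int)) :=
  let flip : List ((Int × Int × Int) × (Int × Int × Int) × (Int × Int × Int)) := []
  let flip := (PySem.List.pyRange 0 ((4 * nperiods - 1) - 3) 4).foldl
    (fun flip _ => (((flip ++ [pvM1]) ++ [pvM2]) ++ [pvM1]) ++ [pvM2]) flip
  -- Append last elements
  ((flip ++ [pvM1]) ++ [pvM2]) ++ [pvM1]

-- ===== PORT B =====
def create_flip_matrix_list_apple_symmetric_alt (nperiods : Int) : List ((Int × Int × Int) × (Int × Int × Int) × (Int × Int × Int)) :=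
  (List.replicate (max (2 * nperiods - 1) 1).toNat [pvM1, pvM2]).flatten ++ [pvM1]

-- ===== PRECONDITION & SPEC =====
def Spec_create_flip_matrix_list_apple_symmetric (nperiods : Int) (out : List ((Int × Int × Int) × (Int × Int × Int) × (Int × Int × Int))) : Prop := out = create_flip_matrix_list_apple_symmetric_alt nperiods
instance (nperiods : Int) (out : List ((Int × Int × Int) × (Int × Int × Int) × (Int × Int × Int))) : Decidable (Spec_create_flip_matrix_list_apple_symmetric nperiods out) := by unfold Spec_create_flip_matrix_list_apple_symmetric; infer_instance

-- ===== CLAIM (what is proved, stated in full; the proofs are below) =====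
def Claim_equal_create_flip_matrix_list_apple_symmetric : Prop := ∀ (nperiods : Int), Dom_create_flip_matrix_list_apple_symmetric nperiods → Spec_create_flip_matrix_list_apple_symmetric nperiods (create_flip_matrix_list_apple_symmetric nperiods)

-- ===== LEMMAS AND PROOFS =====

-- A's loop body ignores the loop index: the fold appends a constant block per element.
theorem pv_foldl_const_append {α β : Type} (l : List β) (init c : List α) :
    l.foldl (fun acc _ => acc ++ c) init = init ++ (List.replicate l.length c).flatten := by
  induction l generalizing init with
  | nil => simp
  | cons x xs ih => simp [List.foldl_cons, ih, List.replicate_succ, List.append_assoc]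

-- the loop runs (nperiods - 1).toNat times
theorem pv_range_len (n : Int) :
    (PySem.List.pyRange 0 ((4 * n - 1) - 3) 4).length = (n - 1).toNat := by
  rw [PySem.List.pyRange_of_pos 0 ((4 * n - 1) - 3) (by norm_num)]
  simp only [List.length_map, List.length_range]
  split_ifs with h <;> omega

-- an odd number of [m1,m2] blocks regroups into blocks of four plus one block of two
theorem pv_rep_odd {α : Type} (k : Nat) (m1 m2 : α) :
    (List.replicate (2 * k + 1) [m1, m2]).flatten
      = (List.replicate k [m1, m2, m1, m2]).flatten ++ [m1, m2] := by
  induction k with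
  | zero => simp
  | succ j ih =>
    have h : 2 * (j + 1) + 1 = 2 + (2 * j + 1) := by omega
    rw [h, List.replicate_add, List.flatten_append, ih]
    simp [List.replicate_succ]

-- ===== VERDICT (by name: the statement is the Claim_ definition above) =====
theorem create_flip_matrix_list_apple_symmetric_spec : Claim_equal_create_flip_matrix_list_apple_symmetric := by
  intro n _
  unfold Spec_create_flip_matrix_list_apple_symmetric
  unfold create_flip_matrix_list_apple_symmetric create_flip_matrix_list_apple_symmetric_alt
  have hmax : (max (2 * n - 1) 1).toNat = 2 * (n - 1).toNat + 1 := by omega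
  rw [hmax, pv_rep_odd]
  have hfold := pv_foldl_const_append (PySem.List.pyRange 0 ((4 * n - 1) - 3) 4)
    ([] : List ((Int × Int × Int) × (Int × Int × Int) × (Int × Int × Int))) [pvM1, pvM2, pvM1, pvM2]
  simp only [List.append_assoc, List.cons_append, List.nil_append] at hfold ⊢
  rw [hfold, pv_range_len]
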